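-- pv_equiv track=rewrite | github.com/cyfronet-fid/recommender-system | recommender/services/engine_selector.py | get_engine_names
-- ===== SOURCE A (Python) =====
-- from typing import Dict, Any, List, Tuple
--
-- def get_engine_names(
--     engine_from_req: str,
--     default_engine: str,
--     engines_keys: List[str],
-- ) -> List[str]:
--     """
--     Get engine names
--
--     Order in which engine is selected:
--     1) Engine from a body request if this name is in engines_keys,
--     2) Default engine if this name is in engines_keys,
--     3) Any engine name that exists.
--
--     Args:
--         engine_from_req: engine name requested in a body of the request
--         default_engine: default recommendation engine name
--         engines_keys: any engine name potentially available
--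
--     Returns:
--         engine_names: engines names to load in a proper order
--     """
--     engine_names = []
--
--     for engine in (engine_from_req, default_engine):
--         if engine in engines_keys and engine not in engine_names:
--             engine_names.append(engine)
--     for engine in engines_keys:
--         if engine not in engine_names:
--             engine_names.append(engine)
--
--     return engine_names
-- ===== SOURCE B (Python) =====
-- def get_engine_names(engine_from_req, default_engine, engines_keys):
--     def priority(e):
--         if e == engine_from_req:
--             return 0
--         if e == default_engine:
--             return 1
--         return 2
--     return sorted(dict.fromkeys(engines_keys), key=priority)
-- ===== Notes on version B (the rewrite author's own statement) =====
-- stated objective: faster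
-- what changed: Replaces A's two guarded-append loops (each membership test scans the growing output list) by an ordered dedup of engines_keys followed by a stable sort under a 3-valued priority key (0 = requested engine, 1 = default, 2 = rest), which realizes the same priority order.
import Mathlib
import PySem

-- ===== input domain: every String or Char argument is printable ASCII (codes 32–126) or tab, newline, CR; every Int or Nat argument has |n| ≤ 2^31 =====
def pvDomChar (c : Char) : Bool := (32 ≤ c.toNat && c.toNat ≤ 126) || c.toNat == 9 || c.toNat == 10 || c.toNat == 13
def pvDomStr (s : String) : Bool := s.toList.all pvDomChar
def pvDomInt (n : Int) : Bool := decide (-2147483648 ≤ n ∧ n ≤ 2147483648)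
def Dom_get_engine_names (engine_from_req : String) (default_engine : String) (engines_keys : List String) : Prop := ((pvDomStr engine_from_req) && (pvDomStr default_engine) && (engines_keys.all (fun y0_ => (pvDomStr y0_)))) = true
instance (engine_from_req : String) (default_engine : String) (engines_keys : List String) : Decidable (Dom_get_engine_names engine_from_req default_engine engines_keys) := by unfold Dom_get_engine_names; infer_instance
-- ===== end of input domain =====

-- B replaces A's two guarded-append loops by dedup + stable sort under a 3-valued priority key (alternative decomposition, same results).

-- ===== PORT A =====
-- Literal port of A: two guarded-append loops over the same accumulator.
def get_engine_names (engine_from_req : String) (default_engine : String) (engines_keys : List String) : List String :=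
  let engine_names :=
    [engine_from_req, default_engine].foldl
      (fun acc engine =>
        if engines_keys.contains engine && !acc.contains engine then acc ++ [engine] else acc) []
  engines_keys.foldl
    (fun acc engine => if !acc.contains engine then acc ++ [engine] else acc) engine_names

-- ===== PORT B =====
-- B's helper 'priority': 0 for the requested engine, 1 for the default, 2 otherwise.
def pvPriority (engine_from_req : String) (default_engine : String) (e : String) : Int :=
  if e = engine_from_req then 0 else if e = default_engine then 1 else 2

-- Port of B: sorted(dict.fromkeys(engines_keys), key=priority) — ordered dedup, then stable sort.
def get_engine_names_alt (engine_from_req : String) (default_engine : String) (engines_keys : List String) : List String :=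
  PySem.List.sorted (PySem.List.dedup engines_keys) (pvPriority engine_from_req default_engine)

-- ===== PRECONDITION & SPEC =====
def Spec_get_engine_names (engine_from_req : String) (default_engine : String) (engines_keys : List String) (out : List String) : Prop := out = get_engine_names_alt engine_from_req default_engine engines_keys
instance (engine_from_req : String) (default_engine : String) (engines_keys : List String) (out : List String) : Decidable (Spec_get_engine_names engine_from_req default_engine engines_keys out) := by unfold Spec_get_engine_names; infer_instance

-- ===== CLAIM (what is proved, stated in full; the proofs are below) =====
def Claim_equal_get_engine_names : Prop := ∀ (engine_from_req : String) (default_engine : String) (engines_keys : List String), Dom_get_engine_names engine_from_req default_engine engines_keys → Spec_get_engine_names engine_from_req default_engine engines_keys (get_engine_names engine_from_req default_engine engines_keys)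

-- ===== LEMMAS AND PROOFS =====

-- A's first loop = foldl Set.add over the membership-filtered pair
lemma loop1_eq (keys : List String) : ∀ (l acc : List String),
    l.foldl (fun acc e => if keys.contains e && !acc.contains e then acc ++ [e] else acc) acc
      = (l.filter (fun e => keys.contains e)).foldl PySem.Set.add acc := by
  intro l
  induction l with
  | nil => intro acc; rfl
  | cons x xs ih =>
      intro acc
      simp only [List.foldl_cons, List.filter_cons]
      by_cases hk : x ∈ keys
      · have hc : keys.contains x = true := by simpa using hk
        have hcond : (if keys.contains x && !acc.contains x then acc ++ [x] else acc)
            = PySem.Set.add acc x := by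
          simp only [hc, Bool.true_and, PySem.Set.add, PySem.Set.contains]
          by_cases ha : acc.contains x <;> simp only [ha] <;> simp
        rw [hcond, ih]
        simp [hk]
      · rw [if_neg (by simp [hk]), ih]
        simp [hk]

-- A's second loop = foldl Set.add
lemma loop2_eq : ∀ (l acc : List String),
    l.foldl (fun acc e => if !acc.contains e then acc ++ [e] else acc) acc
      = l.foldl PySem.Set.add acc := by
  intro l
  induction l with
  | nil => intro acc; rfl
  | cons x xs ih =>
      intro acc
      simp only [List.foldl_cons, ih]
      congr 1
      simp only [PySem.Set.add, PySem.Set.contains]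
      by_cases ha : acc.contains x <;> simp only [ha] <;> simp

-- foldl Set.add from an arbitrary accumulator: append the not-yet-seen part of the dedup
lemma foldl_add_acc : ∀ (xs acc : List String),
    xs.foldl PySem.Set.add acc
      = acc ++ (xs.foldl PySem.Set.add []).filter (fun e => !acc.contains e) := by
  intro xs
  induction xs with
  | nil => intro acc; simp
  | cons x xs ih =>
      intro acc
      simp only [List.foldl_cons]
      rw [ih (PySem.Set.add acc x), ih (PySem.Set.add [] x)]
      have hadd0 : PySem.Set.add ([] : List String) x = [x] := rfl
      rw [hadd0]
      by_cases hax : x ∈ acc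
      · have hacc : PySem.Set.add acc x = acc := by
          simp [PySem.Set.add, PySem.Set.contains, hax]
        rw [hacc]
        rw [List.filter_append, List.filter_filter]
        have h1 : [x].filter (fun e => !acc.contains e) = [] := by
          simp [List.contains_eq_mem, hax]
        rw [h1]
        simp only [List.nil_append]
        congr 1
        apply List.filter_congr
        intro e _
        by_cases hex : e = x
        · simp [hex, List.contains_eq_mem, hax]
        · simp [List.contains_eq_mem, hex]
      · have hacc : PySem.Set.add acc x = acc ++ [x] := by
          simp [PySem.Set.add, PySem.Set.contains, List.contains_eq_mem, hax]
        rw [hacc]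
        rw [List.filter_append, List.filter_filter]
        have h1 : [x].filter (fun e => !acc.contains e) = [x] := by
          simp [List.contains_eq_mem, hax]
        rw [h1]
        rw [List.append_assoc]
        congr 2
        apply List.filter_congr
        intro e _
        by_cases hex : e = x
        · simp [hex, List.contains_eq_mem, hax]
        · simp [List.contains_eq_mem, List.mem_append, hex]

-- insertBy walks past a block it does not go before
lemma insertBy_append_not {α : Type} (before : α → α → Bool) (x : α) (l t : List α)
    (h : ∀ y ∈ l, before x y = false) :
    PySem.List.insertBy before x (l ++ t) = l ++ PySem.List.insertBy before x t := by
  induction l with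
  | nil => simp
  | cons y ys ih =>
      simp only [List.cons_append, PySem.List.insertBy]
      rw [h y (by simp)]
      simp only [Bool.false_eq_true, if_false]
      rw [ih (fun z hz => h z (by simp [hz]))]

-- insertBy goes in front of a block it goes before everywhere
lemma insertBy_all_true {α : Type} (before : α → α → Bool) (x : α) (t : List α)
    (h : ∀ y ∈ t, before x y = true) :
    PySem.List.insertBy before x t = x :: t := by
  cases t with
  | nil => rfl
  | cons y ys => simp [PySem.List.insertBy, h y (by simp)]

-- stable insertion under a {0,1,2}-valued key keeps three ordered buckets
lemma foldl_insertBy_bucket {α : Type} (key : α → Int) : ∀ (xs b0 b1 b2 : List α),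
    (∀ y ∈ b0, key y = 0) → (∀ y ∈ b1, key y = 1) → (∀ y ∈ b2, key y = 2) →
    (∀ x ∈ xs, key x = 0 ∨ key x = 1 ∨ key x = 2) →
    xs.foldl (fun acc x => PySem.List.insertBy (fun a b => decide (key a < key b)) x acc)
        (b0 ++ (b1 ++ b2))
      = (b0 ++ xs.filter (fun x => key x == 0))
        ++ ((b1 ++ xs.filter (fun x => key x == 1)) ++ (b2 ++ xs.filter (fun x => key x == 2))) := by
  intro xs
  induction xs with
  | nil => intro b0 b1 b2 _ _ _ _; simp
  | cons x xs ih =>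
      intro b0 b1 b2 h0 h1 h2 hk
      simp only [List.foldl_cons]
      rcases hk x (by simp) with hx | hx | hx
      · have step : PySem.List.insertBy (fun a b => decide (key a < key b)) x (b0 ++ (b1 ++ b2))
            = (b0 ++ [x]) ++ (b1 ++ b2) := by
          rw [insertBy_append_not _ _ _ _ (fun y hy => by simp [h0 y hy, hx]),
              insertBy_all_true _ _ _ (fun y hy => by
                rcases List.mem_append.mp hy with h | h
                · simp [h1 y h, hx]
                · simp [h2 y h, hx])]
          simp
        rw [step, ih (b0 ++ [x]) b1 b2
              (fun y hy => by rcases List.mem_append.mp hy with h | h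
                              · exact h0 y h
                              · simp_all) h1 h2 (fun y hy => hk y (by simp [hy]))]
        simp [hx]
      · have step : PySem.List.insertBy (fun a b => decide (key a < key b)) x (b0 ++ (b1 ++ b2))
            = b0 ++ ((b1 ++ [x]) ++ b2) := by
          rw [insertBy_append_not _ _ _ _ (fun y hy => by simp [h0 y hy, hx]),
              insertBy_append_not _ _ _ _ (fun y hy => by simp [h1 y hy, hx]),
              insertBy_all_true _ _ _ (fun y hy => by simp [h2 y hy, hx])]
          simp
        rw [step, ih b0 (b1 ++ [x]) b2 h0
              (fun y hy => by rcases List.mem_append.mp hy with h | h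
                              · exact h1 y h
                              · simp_all) h2 (fun y hy => hk y (by simp [hy]))]
        simp [hx]
      · have step : PySem.List.insertBy (fun a b => decide (key a < key b)) x (b0 ++ (b1 ++ b2))
            = b0 ++ (b1 ++ (b2 ++ [x])) := by
          rw [insertBy_append_not _ _ _ _ (fun y hy => by simp [h0 y hy, hx]),
              insertBy_append_not _ _ _ _ (fun y hy => by simp [h1 y hy, hx]),
              PySem.List.insertBy_of_forall_not_before _ _ _ (fun y hy => by simp [h2 y hy, hx])]
        rw [step, ih b0 b1 (b2 ++ [x]) h0 h1
              (fun y hy => by rcases List.mem_append.mp hy with h | h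
                              · exact h2 y h
                              · simp_all) (fun y hy => hk y (by simp [hy]))]
        simp [hx]

-- stable sort under a {0,1,2}-valued key = the three filters in order
lemma sorted_bucket3 {α : Type} (key : α → Int) (xs : List α)
    (hk : ∀ x ∈ xs, key x = 0 ∨ key x = 1 ∨ key x = 2) :
    PySem.List.sorted xs key
      = xs.filter (fun x => key x == 0) ++ (xs.filter (fun x => key x == 1)
          ++ xs.filter (fun x => key x == 2)) := by
  rw [PySem.List.sorted_eq_foldl_insertBy]
  have := foldl_insertBy_bucket key xs [] [] []
    (by simp) (by simp) (by simp) hk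
  simpa using this

-- on a nodup list, filtering for an element it contains gives exactly [x]
lemma filter_eq_singleton_of_nodup {α : Type} [DecidableEq α] (l : List α) (x : α)
    (hn : l.Nodup) (hx : x ∈ l) : l.filter (fun e => e == x) = [x] := by
  induction l with
  | nil => simp at hx
  | cons y ys ih =>
      simp only [List.filter_cons]
      rcases List.mem_cons.mp hx with h | h
      · have hxy : (y == x) = true := by simp [h]
        rw [if_pos hxy]
        have hnil : ys.filter (fun e => e == x) = [] := by
          apply List.filter_eq_nil_iff.mpr
          intro a ha
          simp only [beq_iff_eq]
          rintro rfl
          exact (List.nodup_cons.mp hn).1 (h ▸ ha)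
        rw [hnil, h]
      · have hne : y ≠ x := by
          rintro rfl
          exact (List.nodup_cons.mp hn).1 h
        rw [if_neg (by simp [hne])]
        exact ih (List.nodup_cons.mp hn).2 h

lemma filter_eq_nil_of_not_mem {α : Type} [DecidableEq α] (l : List α) (x : α)
    (hx : x ∉ l) : l.filter (fun e => e == x) = [] := by
  apply List.filter_eq_nil_iff.mpr
  intro a ha
  simp only [beq_iff_eq]
  rintro rfl
  exact hx ha

theorem get_engine_names_spec : Claim_equal_get_engine_names := by
  intro req dflt keys _
  unfold Spec_get_engine_names get_engine_names get_engine_names_alt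
  simp only [loop1_eq, loop2_eq]
  -- d := dedup keys, as a foldl
  have hded : PySem.List.dedup keys = keys.foldl PySem.Set.add [] := by
    rw [PySem.List.dedup_eq_ofList, PySem.Set.ofList_eq_foldl]
  set d := keys.foldl PySem.Set.add [] with hd
  have hdnodup : d.Nodup := by
    rw [hd, ← PySem.Set.ofList_eq_foldl]
    exact PySem.Set.nodup_ofList keys
  have hdmem : ∀ x, x ∈ d ↔ x ∈ keys := by
    intro x
    rw [hd, ← PySem.Set.ofList_eq_foldl]
    exact PySem.Set.mem_ofList keys x
  -- B side: bucket decomposition of the stable sort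
  have hB : PySem.List.sorted (PySem.List.dedup keys) (pvPriority req dflt)
      = d.filter (fun x => pvPriority req dflt x == 0)
        ++ (d.filter (fun x => pvPriority req dflt x == 1)
            ++ d.filter (fun x => pvPriority req dflt x == 2)) := by
    rw [hded]
    exact sorted_bucket3 _ d (fun x _ => by
      unfold pvPriority; split_ifs <;> simp)
  rw [hB]
  -- the priority-0 bucket is the filter for req
  have hf0 : d.filter (fun x => pvPriority req dflt x == 0) = d.filter (fun e => e == req) := by
    apply List.filter_congr
    intro e _
    unfold pvPriority
    by_cases he : e = req
    · simp [he]
    · split_ifs <;> simp_all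
  rw [hf0]
  -- A side: first loop produces the deduped filtered prefix, second appends the unseen part of d
  rw [foldl_add_acc keys, ← hd]
  by_cases hR : req ∈ keys
  · have hRd : req ∈ d := (hdmem req).mpr hR
    rw [filter_eq_singleton_of_nodup d req hdnodup hRd]
    by_cases hE : dflt = req
    · subst hE
      have hp : ([dflt, dflt].filter (fun e => keys.contains e)).foldl PySem.Set.add []
          = [dflt] := by
        simp [List.contains_eq_mem, hR, PySem.Set.add, PySem.Set.contains]
      rw [hp]
      have h1 : d.filter (fun x => pvPriority dflt dflt x == 1) = [] := by
        apply List.filter_eq_nil_iff.mpr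
        intro a _
        unfold pvPriority
        split_ifs <;> simp_all
      rw [h1]
      simp only [List.nil_append, List.cons_append]
      congr 1
      apply List.filter_congr
      intro e _
      unfold pvPriority
      by_cases he : e = dflt <;> simp [he, List.contains_eq_mem]
    · by_cases hD : dflt ∈ keys
      · -- both present, distinct
        have hDd : dflt ∈ d := (hdmem dflt).mpr hD
        have hp : ([req, dflt].filter (fun e => keys.contains e)).foldl PySem.Set.add []
            = [req, dflt] := by
          simp [List.contains_eq_mem, hR, hD,
            PySem.Set.add, PySem.Set.contains, hE]
        rw [hp]
        have h1 : d.filter (fun x => pvPriority req dflt x == 1)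
            = d.filter (fun e => e == dflt) := by
          apply List.filter_congr
          intro e _
          unfold pvPriority
          by_cases he : e = req
          · simp [he, Ne.symm hE]
          · by_cases hed : e = dflt <;> simp [he, hed, hE]
        rw [h1, filter_eq_singleton_of_nodup d dflt hdnodup hDd]
        simp only [List.cons_append, List.nil_append]
        congr 2
        apply List.filter_congr
        intro e _
        unfold pvPriority
        by_cases he : e = req
        · simp [he, List.contains_eq_mem]
        · by_cases hed : e = dflt <;> simp [he, hed, hE, List.contains_eq_mem]
      · -- only req present
        have hDd : dflt ∉ d := fun h => hD ((hdmem dflt).mp h)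
        have hp : ([req, dflt].filter (fun e => keys.contains e)).foldl PySem.Set.add []
            = [req] := by
          simp [List.contains_eq_mem, hR, hD, PySem.Set.add, PySem.Set.contains]
        rw [hp]
        have h1 : d.filter (fun x => pvPriority req dflt x == 1) = [] := by
          apply List.filter_eq_nil_iff.mpr
          intro a ha
          unfold pvPriority
          have : a ≠ dflt := by rintro rfl; exact hDd ha
          split_ifs <;> simp_all
        rw [h1]
        simp only [List.cons_append, List.nil_append]
        congr 1
        apply List.filter_congr
        intro e he
        unfold pvPriority
        have hed : e ≠ dflt := by rintro rfl; exact hDd he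
        by_cases her : e = req <;> simp [her, hed, List.contains_eq_mem]
  · have hRd : req ∉ d := fun h => hR ((hdmem req).mp h)
    rw [filter_eq_nil_of_not_mem d req hRd]
    by_cases hD : dflt ∈ keys
    · -- only dflt present
      have hDd : dflt ∈ d := (hdmem dflt).mpr hD
      have hE : dflt ≠ req := by rintro rfl; exact hR hD
      have hp : ([req, dflt].filter (fun e => keys.contains e)).foldl PySem.Set.add []
          = [dflt] := by
        simp [List.contains_eq_mem, hR, hD, PySem.Set.add, PySem.Set.contains]
      rw [hp]
      have h1 : d.filter (fun x => pvPriority req dflt x == 1)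
          = d.filter (fun e => e == dflt) := by
        apply List.filter_congr
        intro e he
        unfold pvPriority
        have her : e ≠ req := by rintro rfl; exact hRd he
        by_cases hed : e = dflt <;> simp [her, hed, hE]
      rw [h1, filter_eq_singleton_of_nodup d dflt hdnodup hDd]
      simp only [List.nil_append, List.cons_append]
      congr 1
      apply List.filter_congr
      intro e he
      unfold pvPriority
      have her : e ≠ req := by rintro rfl; exact hRd he
      by_cases hed : e = dflt <;> simp [her, hed, hE, List.contains_eq_mem]
    · -- neither present
      have hDd : dflt ∉ d := fun h => hD ((hdmem dflt).mp h)
      have hp : ([req, dflt].filter (fun e => keys.contains e)).foldl PySem.Set.add []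
          = [] := by
        simp [List.contains_eq_mem, hR, hD]
      rw [hp]
      have h1 : d.filter (fun x => pvPriority req dflt x == 1) = [] := by
        apply List.filter_eq_nil_iff.mpr
        intro a ha
        unfold pvPriority
        have : a ≠ dflt := by rintro rfl; exact hDd ha
        split_ifs <;> simp_all
      rw [h1]
      have h2 : d.filter (fun x => pvPriority req dflt x == 2) = d := by
        apply List.filter_eq_self.mpr
        intro a ha
        unfold pvPriority
        have ha1 : a ≠ req := by rintro rfl; exact hRd ha
        have ha2 : a ≠ dflt := by rintro rfl; exact hDd ha
        simp [ha1, ha2]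
      rw [h2]
      simp
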